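-- pv_equiv track=rewrite | github.com/TheLayman/parking_vision_poc | webapp/helpers/slot_meta.py | calculate_zone_stats
-- ===== SOURCE A (Python) =====
-- def calculate_zone_stats(slot_ids: list[int], occupied_ids: set,
--                          meta_by_id: dict[int, dict]) -> tuple:
--     """Calculate zone statistics. Returns ``(zones_stats, free_count, total_count)``."""
--     zones_stats: dict[str, dict] = {}
--     free_count = 0
--     total_count = len(slot_ids)
--
--     for sid in slot_ids:
--         is_occupied = sid in occupied_ids
--         meta = meta_by_id.get(sid, {})
--         zone = meta.get("zone", "A")
--
--         if zone not in zones_stats: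
--             zones_stats[zone] = {"total": 0, "free": 0, "occupied": 0}
--
--         zones_stats[zone]["total"] += 1
--         if is_occupied:
--             zones_stats[zone]["occupied"] += 1
--         else:
--             zones_stats[zone]["free"] += 1
--             free_count += 1
--
--     return zones_stats, free_count, total_count
-- ===== SOURCE B (Python) =====
-- def calculate_zone_stats(slot_ids: list[int], occupied_ids: set,
--                          meta_by_id: dict[int, dict]) -> tuple:
--     """Two-pass shape: build an ordered zone -> [sid] index, then aggregate each group."""
--     groups: dict[str, list] = {}
--     for sid in slot_ids:
--         zone = meta_by_id.get(sid, {}).get("zone", "A")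
--         groups.setdefault(zone, []).append(sid)
--
--     zones_stats: dict[str, dict] = {}
--     free_count = 0
--     for zone, group in groups.items():
--         total = len(group)
--         occupied = sum(1 for s in group if s in occupied_ids)
--         free = total - occupied
--         zones_stats[zone] = {"total": total, "free": free, "occupied": occupied}
--         free_count += free
--
--     return zones_stats, free_count, len(slot_ids)
-- ===== Notes on version B (the rewrite author's own statement) =====
-- stated objective: alternative
-- what changed: Replaces the single incremental-counting pass (nested counter dict updated per slot) by a build-index-then-aggregate shape: one pass groups slot ids per zone in first-appearance order, a second pass over the grouping emits each zone's total/occupied/free and sums the free count.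
import Mathlib
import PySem

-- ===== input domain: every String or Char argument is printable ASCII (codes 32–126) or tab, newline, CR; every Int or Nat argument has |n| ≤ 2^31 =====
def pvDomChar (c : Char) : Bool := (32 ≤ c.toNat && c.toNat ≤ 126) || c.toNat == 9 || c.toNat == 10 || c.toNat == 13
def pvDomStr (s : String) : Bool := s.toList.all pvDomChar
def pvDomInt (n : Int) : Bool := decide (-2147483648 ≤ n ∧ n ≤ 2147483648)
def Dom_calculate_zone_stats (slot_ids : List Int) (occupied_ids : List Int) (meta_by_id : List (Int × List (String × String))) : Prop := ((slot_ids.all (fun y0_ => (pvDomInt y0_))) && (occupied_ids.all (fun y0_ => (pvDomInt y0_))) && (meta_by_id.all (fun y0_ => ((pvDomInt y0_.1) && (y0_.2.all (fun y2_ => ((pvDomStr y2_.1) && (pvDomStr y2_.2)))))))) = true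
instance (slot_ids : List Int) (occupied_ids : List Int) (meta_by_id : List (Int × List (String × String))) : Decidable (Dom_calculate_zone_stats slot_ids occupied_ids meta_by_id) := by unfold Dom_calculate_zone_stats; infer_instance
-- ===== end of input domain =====

-- B replaces A's single incremental-counting pass by a build-index-then-aggregate two-pass shape (objective: alternative, same cost).

-- shared helper: `meta_by_id.get(sid, {}).get("zone", "A")` (both Pythons compute the zone this way)
def pvZone (meta_by_id : List (Int × List (String × String))) (sid : Int) : String :=
  match meta_by_id.find? (fun p => p.1 == sid) with
  | some p =>
    match p.2.find? (fun q => q.1 == "zone") with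
    | some q => q.2
    | none => "A"
  | none => "A"

-- ===== PORT A =====
def calculate_zone_stats (slot_ids : List Int) (occupied_ids : List Int) (meta_by_id : List (Int × List (String × String))) : (List (String × List (String × Int))) × Int × Int :=
  let total_count : Int := slot_ids.length
  let res := slot_ids.foldl
    (fun (st : PySem.Dict String (PySem.Dict String Int) × Int) sid =>
      let is_occupied := occupied_ids.contains sid
      let zone := pvZone meta_by_id sid
      let zs := if st.1.contains zone then st.1
                else st.1.insert zone (PySem.Dict.mk [("total", 0), ("free", 0), ("occupied", 0)])
      -- in-place nested mutation ported as read-modify-write of the inner dict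
      let inner := (zs.getD zone (PySem.Dict.mk [])).modify "total" 0 (· + 1)
      if is_occupied then (zs.insert zone (inner.modify "occupied" 0 (· + 1)), st.2)
      else (zs.insert zone (inner.modify "free" 0 (· + 1)), st.2 + 1))
    (PySem.Dict.empty, 0)
  (res.1.items.map (fun p => (p.1, p.2.items)), res.2, total_count)

-- ===== PORT B =====
def calculate_zone_stats_alt (slot_ids : List Int) (occupied_ids : List Int) (meta_by_id : List (Int × List (String × String))) : (List (String × List (String × Int))) × Int × Int :=
  let groups : PySem.Dict String (List Int) :=
    slot_ids.foldl (fun d sid => d.modify (pvZone meta_by_id sid) [] (· ++ [sid])) PySem.Dict.empty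
  let res := groups.items.foldl
    (fun (st : List (String × List (String × Int)) × Int) p =>
      let total : Int := p.2.length
      let occupied : Int := (p.2.filter (fun s => occupied_ids.contains s)).length
      let free := total - occupied
      (st.1 ++ [(p.1, [("total", total), ("free", free), ("occupied", occupied)])], st.2 + free))
    ([], 0)
  (res.1, res.2, (slot_ids.length : Int))

-- ===== PRECONDITION & SPEC =====
def Spec_calculate_zone_stats (slot_ids : List Int) (occupied_ids : List Int) (meta_by_id : List (Int × List (String × String))) (out : (List (String × List (String × Int))) × Int × Int) : Prop := out = calculate_zone_stats_alt slot_ids occupied_ids meta_by_id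
instance (slot_ids : List Int) (occupied_ids : List Int) (meta_by_id : List (Int × List (String × String))) (out : (List (String × List (String × Int))) × Int × Int) : Decidable (Spec_calculate_zone_stats slot_ids occupied_ids meta_by_id out) := by unfold Spec_calculate_zone_stats; infer_instance

-- ===== CLAIM (what is proved, stated in full; the proofs are below) =====
def Claim_equal_calculate_zone_stats : Prop := ∀ (slot_ids : List Int) (occupied_ids : List Int) (meta_by_id : List (Int × List (String × String))), Dom_calculate_zone_stats slot_ids occupied_ids meta_by_id → Spec_calculate_zone_stats slot_ids occupied_ids meta_by_id (calculate_zone_stats slot_ids occupied_ids meta_by_id)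

-- ===== LEMMAS AND PROOFS =====

-- proof-side abbreviations
def pvOccI (occ : List Int) (g : List Int) : Int := ((g.filter (fun s => occ.contains s)).length : Int)
def pvStats (occ : List Int) (g : List Int) : PySem.Dict String Int :=
  PySem.Dict.mk [("total", (g.length : Int)), ("free", (g.length : Int) - pvOccI occ g), ("occupied", pvOccI occ g)]
def pvGrp (mb : List (Int × List (String × String))) (xs : List Int) (zo : String) : List Int :=
  xs.filter (fun s => pvZone mb s == zo)
def pvZones (mb : List (Int × List (String × String))) (xs : List Int) : List String :=
  PySem.Set.ofList (xs.map (pvZone mb))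
def pvFree (occ : List Int) (xs : List Int) : Int := ((xs.filter (fun s => !occ.contains s)).length : Int)

def pvStepA (occupied_ids : List Int) (meta_by_id : List (Int × List (String × String)))
    (st : PySem.Dict String (PySem.Dict String Int) × Int) (sid : Int) :
    PySem.Dict String (PySem.Dict String Int) × Int :=
  let is_occupied := occupied_ids.contains sid
  let zone := pvZone meta_by_id sid
  let zs := if st.1.contains zone then st.1
            else st.1.insert zone (PySem.Dict.mk [("total", 0), ("free", 0), ("occupied", 0)])
  let inner := (zs.getD zone (PySem.Dict.mk [])).modify "total" 0 (· + 1)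
  if is_occupied then (zs.insert zone (inner.modify "occupied" 0 (· + 1)), st.2)
  else (zs.insert zone (inner.modify "free" 0 (· + 1)), st.2 + 1)


lemma pvKeys_mkmap {ν : Type} (zs : List String) (F : String → ν) :
    (PySem.Dict.mk (zs.map (fun z' => (z', F z')))).keys = zs := by
  rw [PySem.Dict.keys_mk, List.map_map]
  exact List.map_id zs

lemma pvContains_mkmap {ν : Type} (zs : List String) (F : String → ν) (zo : String) :
    (PySem.Dict.mk (zs.map (fun z' => (z', F z')))).contains zo = decide (zo ∈ zs) := by
  rw [PySem.Dict.contains_eq_decide_mem_keys, pvKeys_mkmap]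

lemma pvGetD_mkmap {ν : Type} (zs : List String) (hnd : zs.Nodup) (F : String → ν) (zo : String)
    (h : zo ∈ zs) (d0 : ν) :
    (PySem.Dict.mk (zs.map (fun z' => (z', F z')))).getD zo d0 = F zo := by
  apply PySem.Dict.getD_of_mem_items
  · exact List.mem_map_of_mem h
  · rw [pvKeys_mkmap]; exact hnd

lemma pvInsert_mkmap_mem {ν : Type} (zs : List String) (F : String → ν) (zo : String)
    (h : zo ∈ zs) (v : ν) :
    (PySem.Dict.mk (zs.map (fun z' => (z', F z')))).insert zo v
      = PySem.Dict.mk (zs.map (fun z' => if z' = zo then (zo, v) else (z', F z'))) := by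
  apply PySem.Dict.ext
  rw [PySem.Dict.items_insert_of_contains]
  · simp only [List.map_map]
    apply List.map_congr_left
    intro a _
    by_cases ha : a = zo <;> simp [ha]
  · rw [pvContains_mkmap]; simpa using h

lemma pvInsert_mkmap_not_mem {ν : Type} (zs : List String) (F : String → ν) (zo : String)
    (h : zo ∉ zs) (v : ν) :
    (PySem.Dict.mk (zs.map (fun z' => (z', F z')))).insert zo v
      = PySem.Dict.mk (zs.map (fun z' => (z', F z')) ++ [(zo, v)]) := by
  apply PySem.Dict.ext
  rw [PySem.Dict.items_insert_of_not_contains]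
  rw [pvContains_mkmap]; simpa using h

lemma pvModify_occ (t f o : Int) :
    ((PySem.Dict.mk [("total",t),("free",f),("occupied",o)]).modify "total" 0 (· + 1)).modify "occupied" 0 (· + 1)
      = PySem.Dict.mk [("total",t+1),("free",f),("occupied",o+1)] := rfl

lemma pvModify_free (t f o : Int) :
    ((PySem.Dict.mk [("total",t),("free",f),("occupied",o)]).modify "total" 0 (· + 1)).modify "free" 0 (· + 1)
      = PySem.Dict.mk [("total",t+1),("free",f+1),("occupied",o)] := rfl

lemma pvGrp_append (mb : List (Int × List (String × String))) (xs : List Int) (s : Int) (zo : String) :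
    pvGrp mb (xs ++ [s]) zo = pvGrp mb xs zo ++ (if pvZone mb s = zo then [s] else []) := by
  by_cases h : pvZone mb s = zo <;> simp [pvGrp, List.filter_append, h]

lemma pvOccI_append (occ : List Int) (g : List Int) (s : Int) :
    pvOccI occ (g ++ [s]) = pvOccI occ g + (if s ∈ occ then 1 else 0) := by
  by_cases h : s ∈ occ <;> simp [pvOccI, List.filter_append, h]

lemma pvStats_append (occ : List Int) (g : List Int) (s : Int) (hc : s ∈ occ) :
    pvStats occ (g ++ [s])
      = ((pvStats occ g).modify "total" 0 (· + 1)).modify "occupied" 0 (· + 1) := by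
  have hlen : (((g ++ [s]).length : Nat) : Int) = (g.length : Int) + 1 := by
    simp [List.length_append]
  have hocc : pvOccI occ (g ++ [s]) = pvOccI occ g + 1 := by simp [pvOccI_append, hc]
  rw [pvStats, pvStats, pvModify_occ, hocc, hlen]
  have : (g.length : Int) + 1 - (pvOccI occ g + 1) = (g.length : Int) - pvOccI occ g := by ring
  rw [this]

lemma pvStats_append_free (occ : List Int) (g : List Int) (s : Int) (hc : s ∉ occ) :
    pvStats occ (g ++ [s])
      = ((pvStats occ g).modify "total" 0 (· + 1)).modify "free" 0 (· + 1) := by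
  have hlen : (((g ++ [s]).length : Nat) : Int) = (g.length : Int) + 1 := by
    simp [List.length_append]
  have hocc : pvOccI occ (g ++ [s]) = pvOccI occ g := by simp [pvOccI_append, hc]
  rw [pvStats, pvStats, pvModify_free, hocc, hlen]
  have : (g.length : Int) + 1 - pvOccI occ g = (g.length : Int) - pvOccI occ g + 1 := by ring
  rw [this]

lemma pvFree_append (occ : List Int) (xs : List Int) (s : Int) :
    pvFree occ (xs ++ [s]) = pvFree occ xs + (if s ∈ occ then 0 else 1) := by
  by_cases h : s ∈ occ <;> simp [pvFree, List.filter_append, h]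

lemma pvZones_append (mb : List (Int × List (String × String))) (xs : List Int) (s : Int) :
    pvZones mb (xs ++ [s]) = PySem.Set.add (pvZones mb xs) (pvZone mb s) := by
  simp [pvZones, List.map_append, PySem.Set.ofList_append_singleton]

lemma pvA_fold (occ : List Int) (mb : List (Int × List (String × String))) (xs : List Int) :
    xs.foldl (pvStepA occ mb) (PySem.Dict.empty, 0)
      = (PySem.Dict.mk ((pvZones mb xs).map (fun zo => (zo, pvStats occ (pvGrp mb xs zo)))), pvFree occ xs) := by
  induction xs using List.reverseRecOn with
  | nil => rfl
  | append_singleton xs s ih =>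
    rw [List.foldl_append, ih]
    simp only [List.foldl_cons, List.foldl_nil]
    simp only [pvStepA]
    by_cases h : pvZone mb s ∈ (xs.map (pvZone mb))
    · have hz : pvZone mb s ∈ pvZones mb xs := by simp [pvZones, PySem.Set.mem_ofList, h]
      have hnd : (pvZones mb xs).Nodup := PySem.Set.nodup_ofList _
      have hgrps : ∀ zo' , zo' ≠ pvZone mb s → pvGrp mb (xs ++ [s]) zo' = pvGrp mb xs zo' := by
        intro zo' hne
        rw [pvGrp_append, if_neg (fun e => hne e.symm)]
        simp
      rw [pvZones_append, PySem.Set.add_of_mem hz]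
      simp only [pvContains_mkmap, hz, decide_true, if_true]
      rw [pvGetD_mkmap _ hnd _ _ hz]
      rw [pvFree_append]
      by_cases hoc : s ∈ occ
      · have hc : occ.contains s = true := by simpa using hoc
        simp only [hc, hoc, add_zero, if_pos]
        refine congrArg₂ Prod.mk ?_ rfl
        rw [← pvStats_append occ _ s hoc, pvInsert_mkmap_mem _ _ _ hz]
        apply PySem.Dict.ext
        apply List.map_congr_left
        intro a ha
        by_cases hae : a = pvZone mb s
        · subst hae; rw [pvGrp_append, if_pos rfl]; simp
        · rw [hgrps a hae]; simp [hae]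
      · have hc : occ.contains s = false := by simpa using hoc
        simp only [hc, Bool.false_eq_true, if_false, hoc]
        refine congrArg₂ Prod.mk ?_ rfl
        rw [← pvStats_append_free occ _ s hoc, pvInsert_mkmap_mem _ _ _ hz]
        apply PySem.Dict.ext
        apply List.map_congr_left
        intro a ha
        by_cases hae : a = pvZone mb s
        · subst hae; rw [pvGrp_append, if_pos rfl]; simp
        · rw [hgrps a hae]; simp [hae]
    · have hz : pvZone mb s ∉ pvZones mb xs := by simp [pvZones, PySem.Set.mem_ofList, h]
      have hgrps : ∀ zo' , zo' ≠ pvZone mb s → pvGrp mb (xs ++ [s]) zo' = pvGrp mb xs zo' := by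
        intro zo' hne
        rw [pvGrp_append, if_neg (fun e => hne e.symm)]
        simp
      have hgrp0 : pvGrp mb xs (pvZone mb s) = [] := by
        rw [pvGrp, List.filter_eq_nil_iff]
        intro a ha hEq
        have : pvZone mb a = pvZone mb s := by simpa using hEq
        exact h (this ▸ List.mem_map_of_mem ha)
      have hgrpS : pvGrp mb (xs ++ [s]) (pvZone mb s) = [s] := by
        rw [pvGrp_append, if_pos rfl, hgrp0, List.nil_append]
      rw [pvZones_append, PySem.Set.add_of_not_mem hz]
      have hcont : (PySem.Dict.mk ((pvZones mb xs).map (fun zo => (zo, pvStats occ (pvGrp mb xs zo))))).contains (pvZone mb s) = false := by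
        rw [pvContains_mkmap]; simpa using hz
      rw [hcont]
      simp only [Bool.false_eq_true, if_false]
      simp only [PySem.Dict.getD_insert_self, PySem.Dict.insert_insert_self]
      rw [pvFree_append, List.map_append]
      have hmap : (pvZones mb xs).map (fun zo => (zo, pvStats occ (pvGrp mb (xs ++ [s]) zo)))
          = (pvZones mb xs).map (fun zo => (zo, pvStats occ (pvGrp mb xs zo))) := by
        apply List.map_congr_left
        intro a ha
        rw [hgrps a (fun e => hz (e ▸ ha))]
      by_cases hoc : s ∈ occ
      · have hc : occ.contains s = true := by simpa using hoc
        simp only [hc, if_true, hoc, add_zero]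
        refine congrArg₂ Prod.mk ?_ rfl
        rw [pvInsert_mkmap_not_mem _ _ _ hz]
        apply PySem.Dict.ext
        rw [hmap]
        congr 1
        simp only [List.map_cons, List.map_nil, hgrpS]
        norm_num [pvStats, pvOccI, hoc, pvModify_occ]
      · have hc : occ.contains s = false := by simpa using hoc
        simp only [hc, Bool.false_eq_true, if_false, hoc]
        refine congrArg₂ Prod.mk ?_ rfl
        rw [pvInsert_mkmap_not_mem _ _ _ hz]
        apply PySem.Dict.ext
        rw [hmap]
        congr 1
        simp only [List.map_cons, List.map_nil, hgrpS]
        norm_num [pvStats, pvOccI, hoc, pvModify_free]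

def pvStepB (occupied_ids : List Int) (st : List (String × List (String × Int)) × Int)
    (p : String × List Int) : List (String × List (String × Int)) × Int :=
  let total : Int := p.2.length
  let occupied : Int := (p.2.filter (fun s => occupied_ids.contains s)).length
  let free := total - occupied
  (st.1 ++ [(p.1, [("total", total), ("free", free), ("occupied", occupied)])], st.2 + free)

lemma pvModify_eq {ν : Type} (d : PySem.Dict String ν) (k : String) (dflt : ν) (f : ν → ν) :
    d.modify k dflt f = d.insert k (f (d.getD k dflt)) := rfl

lemma pvB_groups (mb : List (Int × List (String × String))) (xs : List Int) :
    xs.foldl (fun d sid => d.modify (pvZone mb sid) [] (· ++ [sid])) PySem.Dict.empty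
      = PySem.Dict.mk ((pvZones mb xs).map (fun zo => (zo, pvGrp mb xs zo))) := by
  induction xs using List.reverseRecOn with
  | nil => rfl
  | append_singleton xs s ih =>
    rw [List.foldl_append, ih]
    simp only [List.foldl_cons, List.foldl_nil, pvModify_eq]
    rw [pvZones_append]
    by_cases h : pvZone mb s ∈ (xs.map (pvZone mb))
    · have hz : pvZone mb s ∈ pvZones mb xs := by simp [pvZones, PySem.Set.mem_ofList, h]
      have hnd : (pvZones mb xs).Nodup := PySem.Set.nodup_ofList _
      rw [PySem.Set.add_of_mem hz]
      rw [pvGetD_mkmap _ hnd _ _ hz, pvInsert_mkmap_mem _ _ _ hz]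
      apply PySem.Dict.ext
      apply List.map_congr_left
      intro a ha
      by_cases hae : a = pvZone mb s
      · subst hae; simp [pvGrp_append]
      · simp [pvGrp_append, hae, Ne.symm hae]
    · have hz : pvZone mb s ∉ pvZones mb xs := by simp [pvZones, PySem.Set.mem_ofList, h]
      have hgrp0 : pvGrp mb xs (pvZone mb s) = [] := by
        rw [pvGrp, List.filter_eq_nil_iff]
        intro a ha hEq
        have : pvZone mb a = pvZone mb s := by simpa using hEq
        exact h (this ▸ List.mem_map_of_mem ha)
      rw [PySem.Set.add_of_not_mem hz]
      have hcont : (PySem.Dict.mk ((pvZones mb xs).map (fun zo => (zo, pvGrp mb xs zo)))).contains (pvZone mb s) = false := by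
        rw [pvContains_mkmap]; simpa using hz
      rw [PySem.Dict.getD_of_not_contains _ _ hcont, pvInsert_mkmap_not_mem _ _ _ hz]
      apply PySem.Dict.ext
      rw [List.map_append]
      have h1 : (pvZones mb xs).map (fun zo => (zo, pvGrp mb (xs ++ [s]) zo))
          = (pvZones mb xs).map (fun z' => (z', pvGrp mb xs z')) := by
        apply List.map_congr_left
        intro a ha
        rw [pvGrp_append, if_neg (fun (e : pvZone mb s = a) => hz (e ▸ ha)), List.append_nil]
      rw [h1, List.map_cons, List.map_nil, pvGrp_append, if_pos rfl, hgrp0]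

lemma pvB_emit (occ : List Int) (l : List (String × List Int))
    (acc1 : List (String × List (String × Int))) (acc2 : Int) :
    l.foldl (pvStepB occ) (acc1, acc2)
      = (acc1 ++ l.map (fun p => (p.1, [("total", (p.2.length : Int)),
            ("free", (p.2.length : Int) - pvOccI occ p.2), ("occupied", pvOccI occ p.2)])),
         acc2 + (l.map (fun p => (p.2.length : Int) - pvOccI occ p.2)).sum) := by
  induction l generalizing acc1 acc2 with
  | nil => simp
  | cons p l ih =>
    rw [List.foldl_cons, pvStepB, ih]
    simp [pvOccI]
    ring

lemma pvFree_eq (occ : List Int) (g : List Int) :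
    pvFree occ g = (g.length : Int) - pvOccI occ g := by
  induction g with
  | nil => rfl
  | cons x g ih =>
    by_cases h : x ∈ occ <;>
      simp [pvFree, pvOccI, h] at ih ⊢ <;> omega

lemma pvFree_split (occ : List Int) (p : Int → Bool) (xs : List Int) :
    pvFree occ (xs.filter p) + pvFree occ (xs.filter (fun x => !p x)) = pvFree occ xs := by
  induction xs with
  | nil => rfl
  | cons x xs ih =>
    by_cases hp : p x <;> by_cases h : x ∈ occ <;>
      simp [pvFree, hp, h] at ih ⊢ <;> omega

lemma pvSum_free (occ : List Int) (mb : List (Int × List (String × String))) :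
    ∀ (zs : List String) (xs : List Int), zs.Nodup → (∀ x ∈ xs, pvZone mb x ∈ zs) →
      (zs.map (fun zo => pvFree occ (pvGrp mb xs zo))).sum = pvFree occ xs := by
  intro zs
  induction zs with
  | nil =>
    intro xs _ hcov
    cases xs with
    | nil => rfl
    | cons x xs => exact absurd (hcov x List.mem_cons_self) (List.not_mem_nil)
  | cons zo zs ih =>
    intro xs hnd hcov
    rw [List.map_cons, List.sum_cons]
    have hnd' := hnd.of_cons
    have hzo : zo ∉ zs := by
      intro hmem; exact (List.nodup_cons.mp hnd).1 hmem
    have hmap : zs.map (fun zo' => pvFree occ (pvGrp mb xs zo'))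
        = zs.map (fun zo' => pvFree occ (pvGrp mb (xs.filter (fun x => !(pvZone mb x == zo))) zo')) := by
      apply List.map_congr_left
      intro a ha
      congr 1
      rw [pvGrp, pvGrp, List.filter_filter]
      apply List.filter_congr
      intro x hx
      have haz : a ≠ zo := fun e => hzo (e ▸ ha)
      by_cases he : pvZone mb x = a
      · simp [he, haz]
      · simp [he]
    rw [hmap, ih _ hnd' ?_]
    · rw [← pvFree_split occ (fun x => pvZone mb x == zo) xs]
      congr 1
    · intro x hx
      rcases List.mem_filter.mp hx with ⟨hx1, hx2⟩
      have hne : pvZone mb x ≠ zo := by simpa using hx2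
      rcases List.mem_cons.mp (hcov x hx1) with h1 | h2
      · exact absurd h1 hne
      · exact h2

lemma pvItems_mk {ν : Type} (L : List (String × ν)) : (PySem.Dict.mk L).items = L := rfl


theorem pvMain (xs occ : List Int) (mb : List (Int × List (String × String))) :
    calculate_zone_stats xs occ mb = calculate_zone_stats_alt xs occ mb := by
  have hA : calculate_zone_stats xs occ mb
      = ((pvZones mb xs).map (fun zo => (zo,
            [("total", ((pvGrp mb xs zo).length : Int)),
             ("free", ((pvGrp mb xs zo).length : Int) - pvOccI occ (pvGrp mb xs zo)),
             ("occupied", pvOccI occ (pvGrp mb xs zo))])), pvFree occ xs, (xs.length : Int)) := by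
    show ((xs.foldl (pvStepA occ mb) (PySem.Dict.empty, 0)).1.items.map (fun p => (p.1, p.2.items)),
          (xs.foldl (pvStepA occ mb) (PySem.Dict.empty, 0)).2, (xs.length : Int)) = _
    rw [pvA_fold, pvItems_mk]
    simp [pvStats, List.map_map, Function.comp]
  have hB : calculate_zone_stats_alt xs occ mb
      = ((pvZones mb xs).map (fun zo => (zo,
            [("total", ((pvGrp mb xs zo).length : Int)),
             ("free", ((pvGrp mb xs zo).length : Int) - pvOccI occ (pvGrp mb xs zo)),
             ("occupied", pvOccI occ (pvGrp mb xs zo))])),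
         0 + ((pvZones mb xs).map (fun zo => ((pvGrp mb xs zo).length : Int) - pvOccI occ (pvGrp mb xs zo))).sum,
         (xs.length : Int)) := by
    show (((xs.foldl (fun d sid => d.modify (pvZone mb sid) [] (· ++ [sid])) PySem.Dict.empty).items.foldl (pvStepB occ) ([], 0)).1,
          ((xs.foldl (fun d sid => d.modify (pvZone mb sid) [] (· ++ [sid])) PySem.Dict.empty).items.foldl (pvStepB occ) ([], 0)).2,
          (xs.length : Int)) = _
    rw [pvB_groups, pvB_emit, pvItems_mk]
    simp only [pvOccI, List.map_map, Function.comp_def, List.nil_append]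
  rw [hA, hB]
  have hmapfree : (pvZones mb xs).map (fun zo => ((pvGrp mb xs zo).length : Int) - pvOccI occ (pvGrp mb xs zo))
      = (pvZones mb xs).map (fun zo => pvFree occ (pvGrp mb xs zo)) :=
    List.map_congr_left (fun a _ => (pvFree_eq occ _).symm)
  rw [hmapfree, pvSum_free occ mb (pvZones mb xs) xs (PySem.Set.nodup_ofList _)
      (fun x hx => by simp [pvZones, PySem.Set.mem_ofList]; exact ⟨x, hx, rfl⟩), zero_add]


-- ===== VERDICT (by name: the statement is the Claim_ definition above) =====
theorem calculate_zone_stats_spec : Claim_equal_calculate_zone_stats := by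
  intro slot_ids occupied_ids meta_by_id _
  show calculate_zone_stats slot_ids occupied_ids meta_by_id
      = calculate_zone_stats_alt slot_ids occupied_ids meta_by_id
  exact pvMain slot_ids occupied_ids meta_by_id
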